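-- pv_equiv track=rewrite | github.com/Airyshtoteles/learnLeetCode | Day30/Part3/stone_game_iv.py | winnerSquareGame
-- ===== SOURCE A (Python) =====
-- def winnerSquareGame(n: int) -> bool:
--     dp = [False] * (n + 1)
--     for i in range(1, n + 1):
--         k = 1
--         win = False
--         while k * k <= i:
--             if not dp[i - k * k]:
--                 win = True
--                 break
--             k += 1
--         dp[i] = win
--     return dp[n]
-- ===== SOURCE B (Python) =====
-- def winnerSquareGame(n: int) -> bool:
--     # Forward/push DP over a set of winning positions: every state not yet
--     # marked winning is losing, and pushes a win to each state a square ahead.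
--     wins = set()
--     for i in range(n + 1):
--         if i not in wins:
--             k = 1
--             while i + k * k <= n:
--                 wins.add(i + k * k)
--                 k += 1
--     return n in wins
-- ===== Notes on version B (the rewrite author's own statement) =====
-- stated objective: alternative
-- what changed: Replaces the backward pull DP over a boolean array (each state scans squares back into already-computed entries until it finds a loser) with a forward push DP over a set of winning positions: each unmarked (losing) state i inserts i+k*k into the set, and the answer is membership of n; the inner square loop runs only at losing states.
import Mathlib
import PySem

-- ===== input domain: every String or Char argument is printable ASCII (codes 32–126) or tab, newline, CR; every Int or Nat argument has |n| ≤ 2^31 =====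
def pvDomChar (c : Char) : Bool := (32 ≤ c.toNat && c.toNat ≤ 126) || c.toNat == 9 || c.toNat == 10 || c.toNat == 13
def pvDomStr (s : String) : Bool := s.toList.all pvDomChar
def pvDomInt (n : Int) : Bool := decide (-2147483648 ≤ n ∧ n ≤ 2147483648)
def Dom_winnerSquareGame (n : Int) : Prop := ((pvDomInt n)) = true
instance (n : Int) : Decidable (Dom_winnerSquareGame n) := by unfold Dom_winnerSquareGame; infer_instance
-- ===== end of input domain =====

-- B replaces A's backward pull DP over a boolean array by a forward push DP over a set of winning positions (alternative algorithm/data structure).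


-- ===== PORT A =====
-- inner while loop of A: k = 1; while k*k <= i: if not dp[i-k*k]: win = True; break; k += 1
def aWin (dp : Array Bool) (i k : Nat) : Bool :=
  if h : k * k ≤ i then
    if dp.getD (i - k * k) false = false then true
    else aWin dp i (k + 1)
  else false
termination_by i + 1 - k
decreasing_by
  have hki : k ≤ i := by
    rcases Nat.eq_zero_or_pos k with h0 | h0
    · omega
    · exact le_trans (Nat.le_mul_of_pos_left k h0) h
  omega

-- All indices are nonnegative on Pre_, so the port works with Nat indices (n.toNat).
def winnerSquareGame (n : Int) : Bool :=
  let N := n.toNat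
  let dp := (List.range N).foldl
    (fun dp j => dp.set! (j + 1) (aWin dp (j + 1) 1))
    (Array.replicate (N + 1) false)
  dp.getD N false

-- ===== PORT B =====
-- inner while loop of B: k = 1; while i + k*k <= n: wins.add(i + k*k); k += 1
def bPush (n : Nat) (wins : PySem.Set Nat) (i k : Nat) : PySem.Set Nat :=
  if h : i + k * k ≤ n then bPush n (wins.add (i + k * k)) i (k + 1) else wins
termination_by n + 1 - k
decreasing_by
  have hki : k ≤ n := by
    rcases Nat.eq_zero_or_pos k with h0 | h0
    · omega
    · exact le_trans (Nat.le_mul_of_pos_left k h0) (by omega)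
  omega

def winnerSquareGame_alt (n : Int) : Bool :=
  let N := n.toNat
  let wins := (List.range (N + 1)).foldl
    (fun wins i => if wins.contains i then wins else bPush N wins i 1)
    PySem.Set.empty
  wins.contains N

-- ===== PRECONDITION & SPEC =====
-- Python A raises IndexError (dp[n] on a too-short list) for every n < 0; excluded.
def Pre_winnerSquareGame (n : Int) : Prop := 0 ≤ n
instance (n : Int) : Decidable (Pre_winnerSquareGame n) := by unfold Pre_winnerSquareGame; infer_instance
def pvWitness_winnerSquareGame : Int := (7)

def Spec_winnerSquareGame (n : Int) (out : Bool) : Prop := out = winnerSquareGame_alt n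
instance (n : Int) (out : Bool) : Decidable (Spec_winnerSquareGame n out) := by unfold Spec_winnerSquareGame; infer_instance

-- ===== CLAIM (what is proved, stated in full; the proofs are below) =====
def Claim_equal_winnerSquareGame : Prop := ∀ (n : Int), Dom_winnerSquareGame n → Pre_winnerSquareGame n → Spec_winnerSquareGame n (winnerSquareGame n)

-- ===== LEMMAS AND PROOFS =====

lemma arr_getD_set_self (dp : Array Bool) (x : Nat) (v : Bool) (h : x < dp.size) :
    (dp.set! x v).getD x false = v := by
  rw [Array.getD_eq_getD_getElem?, Array.set!, Array.getElem?_setIfInBounds]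
  simp [h]

lemma arr_getD_set_ne (dp : Array Bool) (x y : Nat) (v : Bool) (hx : x ≠ y) :
    (dp.set! x v).getD y false = dp.getD y false := by
  rw [Array.getD_eq_getD_getElem?, Array.getD_eq_getD_getElem?, Array.set!,
    Array.getElem?_setIfInBounds]
  simp [hx]

lemma arr_getD_replicate (n i : Nat) : (Array.replicate n false).getD i false = false := by
  simp [Array.getD]

-- reference solution: position i is winning iff some smaller position at square distance is losing
def isSq (m : Nat) : Bool := Nat.sqrt m * Nat.sqrt m == m

def winSpec (i : Nat) : Bool :=
  (List.range i).attach.any (fun j => isSq (i - j.1) && !winSpec j.1)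
decreasing_by exact List.mem_range.mp j.2

lemma isSq_iff (m : Nat) : isSq m = true ↔ ∃ k, k * k = m := by
  constructor
  · intro h
    exact ⟨Nat.sqrt m, by simpa [isSq] using h⟩
  · rintro ⟨k, rfl⟩
    rw [isSq]; simp

lemma winSpec_unfold (i : Nat) :
    winSpec i = (List.range i).any (fun j => isSq (i - j) && !winSpec j) := by
  rw [winSpec]; simp

lemma winSpec_eq (i : Nat) :
    winSpec i = true ↔ ∃ k, 1 ≤ k ∧ k * k ≤ i ∧ winSpec (i - k * k) = false := by
  rw [winSpec_unfold]
  simp only [List.any_eq_true, List.mem_range, Bool.and_eq_true, Bool.not_eq_true']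
  constructor
  · rintro ⟨j, hji, hsq, hlose⟩
    obtain ⟨k, hk⟩ := (isSq_iff _).mp hsq
    rcases Nat.eq_zero_or_pos k with rfl | hk1
    · simp at hk; omega
    refine ⟨k, hk1, by omega, ?_⟩
    have : i - k * k = j := by omega
    rw [this]; exact hlose
  · rintro ⟨k, hk1, hki, hlose⟩
    have h1 : 1 ≤ k * k := Nat.one_le_iff_ne_zero.mpr (by positivity)
    refine ⟨i - k * k, by omega, ?_, hlose⟩
    exact (isSq_iff _).mpr ⟨k, by omega⟩

lemma winSpec_zero : winSpec 0 = false := by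
  rw [winSpec_unfold]; simp

-- ===== A side =====

lemma aWin_iff (dp : Array Bool) (i k : Nat) :
    aWin dp i k = true ↔
      ∃ k', k ≤ k' ∧ k' * k' ≤ i ∧ dp.getD (i - k' * k') false = false := by
  fun_induction aWin dp i k with
  | case1 k h hz =>
      exact iff_of_true rfl ⟨k, le_refl k, h, hz⟩
  | case2 k h hz ih =>
      rw [ih]
      constructor
      · rintro ⟨k', h1, h2, h3⟩; exact ⟨k', by omega, h2, h3⟩
      · rintro ⟨k', h1, h2, h3⟩
        refine ⟨k', ?_, h2, h3⟩
        rcases Nat.eq_or_lt_of_le h1 with rfl | h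
        · exact absurd h3 hz
        · omega
  | case3 k h =>
      constructor
      · intro h'; exact absurd h' (by simp)
      · rintro ⟨k', h1, h2, _⟩
        exact absurd h2 (fun hh => h (le_trans (Nat.mul_le_mul h1 h1) hh))

lemma aWin_spec (dp : Array Bool) (i : Nat)
    (h : ∀ j, j < i → dp.getD j false = winSpec j) :
    aWin dp i 1 = winSpec i := by
  have hA := aWin_iff dp i 1
  have hW := winSpec_eq i
  have key : aWin dp i 1 = true ↔ winSpec i = true := by
    rw [hA, hW]
    constructor <;> rintro ⟨k, h1, h2, h3⟩ <;> refine ⟨k, h1, h2, ?_⟩ <;>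
      have h1' : 1 ≤ k * k := by simpa using Nat.mul_le_mul h1 h1
    · rw [← h (i - k * k) (by omega)]; exact h3
    · rw [h (i - k * k) (by omega)]; exact h3
  cases hx : aWin dp i 1 <;> cases hy : winSpec i <;> simp_all

def loopA (N m : Nat) : Array Bool :=
  (List.range m).foldl
    (fun dp j => dp.set! (j + 1) (aWin dp (j + 1) 1))
    (Array.replicate (N + 1) false)

lemma loopA_inv (N : Nat) : ∀ m, m ≤ N →
    (loopA N m).size = N + 1 ∧
    ∀ i, (loopA N m).getD i false = if i ≤ m then winSpec i else false := by
  intro m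
  induction m with
  | zero =>
      intro _
      refine ⟨by simp [loopA], ?_⟩
      intro i
      have h0 : loopA N 0 = Array.replicate (N + 1) false := rfl
      rw [h0, arr_getD_replicate]
      rcases Nat.eq_zero_or_pos i with rfl | hi
      · simp [winSpec_zero]
      · rw [if_neg (by omega)]
  | succ m ih =>
      intro hm
      obtain ⟨hlen, hval⟩ := ih (by omega)
      have hstep : loopA N (m + 1) =
          (loopA N m).set! (m + 1) (aWin (loopA N m) (m + 1) 1) := by
        simp [loopA, List.range_succ]
      have hwin : aWin (loopA N m) (m + 1) 1 = winSpec (m + 1) := by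
        apply aWin_spec
        intro j hj
        rw [hval j]
        simp [Nat.lt_succ_iff.mp hj]
      constructor
      · rw [hstep]; simpa [Array.set!] using hlen
      · intro i
        rw [hstep]
        by_cases hi : i = m + 1
        · subst hi
          rw [arr_getD_set_self _ _ _ (by omega), hwin]
          simp
        · rw [arr_getD_set_ne _ _ _ _ (by omega : (m + 1) ≠ i), hval i]
          by_cases h2 : i ≤ m <;> simp [h2] <;> omega

lemma winnerSquareGame_eq_winSpec (n : Int) :
    winnerSquareGame n = winSpec n.toNat := by
  obtain ⟨-, hval⟩ := loopA_inv n.toNat n.toNat (le_refl _)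
  have : winnerSquareGame n = (loopA n.toNat n.toNat).getD n.toNat false := rfl
  rw [this, hval]
  simp

-- ===== B side =====

lemma mem_bPush (n : Nat) (wins : PySem.Set Nat) (i k j : Nat) :
    (j ∈ bPush n wins i k ↔
      j ∈ wins ∨ ∃ k', k ≤ k' ∧ i + k' * k' = j ∧ j ≤ n) := by
  fun_induction bPush n wins i k with
  | case1 wins k h ih =>
      rw [ih]
      rw [PySem.Set.mem_add]
      constructor
      · rintro ((hw | rfl) | ⟨k', h1, h2, h3⟩)
        · exact Or.inl hw
        · exact Or.inr ⟨k, le_refl k, rfl, h⟩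
        · exact Or.inr ⟨k', by omega, h2, h3⟩
      · rintro (hw | ⟨k', h1, h2, h3⟩)
        · exact Or.inl (Or.inl hw)
        · rcases Nat.eq_or_lt_of_le h1 with rfl | hlt
          · exact Or.inl (Or.inr h2.symm)
          · exact Or.inr ⟨k', by omega, h2, h3⟩
  | case2 wins k h =>
      constructor
      · exact Or.inl
      · rintro (hw | ⟨k', h1, h2, h3⟩)
        · exact hw
        · exact absurd h3 (by
            have : k * k ≤ k' * k' := Nat.mul_le_mul h1 h1
            omega)

def loopB (N m : Nat) : PySem.Set Nat :=
  (List.range m).foldl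
    (fun wins i => if wins.contains i then wins else bPush N wins i 1)
    PySem.Set.empty

-- characterization of winSpec in "pushed-from-a-loser" form
lemma winSpec_char (m : Nat) :
    ((∃ i, i < m ∧ winSpec i = false ∧ ∃ k, 1 ≤ k ∧ i + k * k = m) ↔ winSpec m = true) := by
  rw [winSpec_eq]
  constructor
  · rintro ⟨i, hi, hlose, k, hk1, hk2⟩
    refine ⟨k, hk1, by omega, ?_⟩
    have : m - k * k = i := by omega
    rw [this]; exact hlose
  · rintro ⟨k, hk1, hk2, hlose⟩
    have h1 : 1 ≤ k * k := by simpa using Nat.mul_le_mul hk1 hk1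
    exact ⟨m - k * k, by omega, hlose, k, hk1, by omega⟩

lemma loopB_inv (N : Nat) : ∀ m, m ≤ N + 1 →
    ∀ j, (j ∈ loopB N m ↔
      ∃ i, i < m ∧ winSpec i = false ∧ ∃ k, 1 ≤ k ∧ i + k * k = j ∧ j ≤ N) := by
  intro m
  induction m with
  | zero =>
      intro _ j
      constructor
      · intro hj
        simp [loopB, PySem.Set.empty] at hj
      · rintro ⟨i, hi, -⟩; omega
  | succ m ih =>
      intro hm
      have hval := ih (by omega)
      have hstep : loopB N (m + 1) =
          (if (loopB N m).contains m then loopB N m else bPush N (loopB N m) m 1) := by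
        simp [loopB, List.range_succ]
      -- membership of m in the set so far is exactly winSpec m
      have hread : (m ∈ loopB N m ↔ winSpec m = true) := by
        rw [hval m, ← winSpec_char m]
        constructor
        · rintro ⟨i, hi, hl, k, hk1, hk2, -⟩; exact ⟨i, hi, hl, k, hk1, hk2⟩
        · rintro ⟨i, hi, hl, k, hk1, hk2⟩
          exact ⟨i, hi, hl, k, hk1, hk2, by omega⟩
      intro j
      by_cases hcur : m ∈ loopB N m
      · -- m already marked winning: nothing pushed
        have hwm : winSpec m = true := hread.mp hcur
        rw [hstep, if_pos (by simpa using hcur), hval j]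
        constructor
        · rintro ⟨i, hi, hl, rest⟩; exact ⟨i, by omega, hl, rest⟩
        · rintro ⟨i, hi, hl, rest⟩
          refine ⟨i, ?_, hl, rest⟩
          rcases Nat.lt_succ_iff_lt_or_eq.mp hi with h | rfl
          · exact h
          · exact absurd hwm (by simp [hl])
      · -- m unmarked: winSpec m = false, push from m
        have hwm : winSpec m = false := by
          cases hx : winSpec m
          · rfl
          · exact absurd (hread.mpr hx) hcur
        rw [hstep, if_neg (by simpa using hcur),
          mem_bPush N (loopB N m) m 1 j, hval j]
        constructor
        · rintro (⟨i, hi, hl, k, hk1, hk2, hj⟩ | ⟨k', hk1, hk2, hk3⟩)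
          · exact ⟨i, by omega, hl, k, hk1, hk2, hj⟩
          · exact ⟨m, by omega, hwm, k', hk1, hk2, hk3⟩
        · rintro ⟨i, hi, hl, k, hk1, hk2, hj⟩
          by_cases him : i = m
          · subst him
            exact Or.inr ⟨k, hk1, hk2, hj⟩
          · exact Or.inl ⟨i, by omega, hl, k, hk1, hk2, hj⟩

lemma winnerSquareGame_alt_eq_winSpec (n : Int) :
    winnerSquareGame_alt n = winSpec n.toNat := by
  have hval := loopB_inv n.toNat (n.toNat + 1) (le_refl _)
  have h2 : (n.toNat ∈ loopB n.toNat (n.toNat + 1) ↔ winSpec n.toNat = true) := by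
    rw [hval n.toNat, ← winSpec_char n.toNat]
    constructor
    · rintro ⟨i, hi, hl, k, hk1, hk2, -⟩
      have h1 : 1 ≤ k * k := by simpa using Nat.mul_le_mul hk1 hk1
      exact ⟨i, by omega, hl, k, hk1, hk2⟩
    · rintro ⟨i, hi, hl, k, hk1, hk2⟩
      have h1 : 1 ≤ k * k := by simpa using Nat.mul_le_mul hk1 hk1
      exact ⟨i, by omega, hl, k, hk1, hk2, by omega⟩
  show (loopB n.toNat (n.toNat + 1)).contains n.toNat = winSpec n.toNat
  cases hx : winSpec n.toNat
  · simpa [hx] using fun hmem => by simp [h2.mp hmem] at hx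
  · simpa using h2.mpr hx

-- ===== VERDICT (by name: the statement is the Claim_ definition above) =====
theorem winnerSquareGame_spec : Claim_equal_winnerSquareGame := by
  intro n _ hpre
  unfold Spec_winnerSquareGame
  rw [winnerSquareGame_eq_winSpec n, winnerSquareGame_alt_eq_winSpec n]
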